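-- pv_equiv track=rewrite | github.com/songk1992/C-_Study | Python/Code/P1316.py | GroupChecker
-- ===== SOURCE A (Python) =====
-- def GroupChecker (arg_string):
--     Check = []
--     arg_array = list(arg_string)
--     while arg_array:
--         now = arg_array.pop(0)
--         if (now in Check) and (previous != now):
--             return -1
--         else:
--             Check.append(now)
--         previous = now
--     return 0
-- ===== SOURCE B (Python) =====
-- def GroupChecker(arg_string):
--     # Phase 1: collapse the string into its run keys (one entry per maximal run).
--     keys = []
--     for ch in arg_string:
--         if not keys or keys[-1] != ch:
--             keys.append(ch)
--     # Phase 2: occurrences are all consecutive iff no run key repeats.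
--     return 0 if len(set(keys)) == len(keys) else -1
-- ===== Notes on version B (the rewrite author's own statement) =====
-- stated objective: faster
-- what changed: B first collapses the string into its list of maximal-run keys, then does a single set-vs-length uniqueness check, replacing A's per-element loop that pops from the front and scans a growing seen-list with an early return.
import Mathlib
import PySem

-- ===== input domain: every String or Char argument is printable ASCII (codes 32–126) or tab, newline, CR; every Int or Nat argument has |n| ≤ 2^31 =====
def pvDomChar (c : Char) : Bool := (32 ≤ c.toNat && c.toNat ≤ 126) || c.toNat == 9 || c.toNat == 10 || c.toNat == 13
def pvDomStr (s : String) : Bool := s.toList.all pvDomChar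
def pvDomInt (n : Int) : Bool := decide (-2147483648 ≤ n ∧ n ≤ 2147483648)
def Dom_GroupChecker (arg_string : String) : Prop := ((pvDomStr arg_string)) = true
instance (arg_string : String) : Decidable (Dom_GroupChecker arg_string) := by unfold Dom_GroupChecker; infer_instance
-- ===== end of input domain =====

-- B collapses the string into its run keys and does one uniqueness check, avoiding A's
-- per-element front-pop and seen-list scan (quadratic); return values are identical.

-- ===== PORT A =====
-- A's while loop popping from the front, with Check list and 'previous' (unset on the
-- first iteration, where the short-circuit 'now in Check' is False — modelled as none).
def GroupChecker.loopA : List Char → List Char → Option Char → Int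
  | [], _, _ => 0
  | now :: rest, check, previous =>
    if now ∈ check ∧ previous ≠ some now then -1
    else GroupChecker.loopA rest (check ++ [now]) (some now)

def GroupChecker (arg_string : String) : Int :=
  GroupChecker.loopA arg_string.toList [] none

-- ===== PORT B =====
def GroupChecker_alt (arg_string : String) : Int :=
  let keys := arg_string.toList.foldl
    (fun ks ch => if ks = [] ∨ ks.getLast? ≠ some ch then ks ++ [ch] else ks) []
  if (PySem.Set.ofList keys).length = keys.length then 0 else -1

-- ===== PRECONDITION & SPEC =====
def Spec_GroupChecker (arg_string : String) (out : Int) : Prop := out = GroupChecker_alt arg_string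
instance (arg_string : String) (out : Int) : Decidable (Spec_GroupChecker arg_string out) := by unfold Spec_GroupChecker; infer_instance

-- ===== CLAIM (what is proved, stated in full; the proofs are below) =====
def Claim_equal_GroupChecker : Prop := ∀ (arg_string : String), Dom_GroupChecker arg_string → Spec_GroupChecker arg_string (GroupChecker arg_string)

-- ===== LEMMAS AND PROOFS =====

-- run keys of a list, continuing a run whose key is p
def runAux : Option Char → List Char → List Char
  | _, [] => []
  | p, c :: r => if p = some c then runAux p r else c :: runAux (some c) r

theorem foldl_runAux : ∀ (rest acc : List Char),
    rest.foldl (fun ks ch => if ks = [] ∨ ks.getLast? ≠ some ch then ks ++ [ch] else ks) acc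
      = acc ++ runAux acc.getLast? rest := by
  intro rest
  induction rest with
  | nil => intro acc; simp [runAux]
  | cons c r ih =>
    intro acc
    by_cases h : acc.getLast? = some c
    · have hne : acc ≠ [] := by
        intro he; rw [he] at h; simp at h
      simp [List.foldl, runAux, h, hne, ih]
    · have : (acc = [] ∨ acc.getLast? ≠ some c) := Or.inr h
      simp only [List.foldl, if_pos this, runAux, if_neg (by simpa [eq_comm] using h)]
      rw [ih]
      simp
  
theorem loopA_eq : ∀ (rest check keys : List Char) (prev : Option Char),
    keys.Nodup → (∀ c, c ∈ check ↔ c ∈ keys) → (∀ p, prev = some p → p ∈ keys) →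
    GroupChecker.loopA rest check prev = if (keys ++ runAux prev rest).Nodup then 0 else -1 := by
  intro rest
  induction rest with
  | nil =>
    intro check keys prev hnd _ _
    simp [GroupChecker.loopA, runAux, hnd]
  | cons now r ih =>
    intro check keys prev hnd hmem hprev
    by_cases hp : prev = some now
    · -- same run continues: no violation, keys unchanged
      have hk : now ∈ keys := hprev now hp
      have hc : now ∈ check := (hmem now).mpr hk
      have hcond : ¬ (now ∈ check ∧ prev ≠ some now) := by
        intro ⟨_, h2⟩; exact h2 hp
      rw [GroupChecker.loopA, if_neg hcond]
      rw [ih (check ++ [now]) keys (some now) hnd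
        (by intro c; simp [hmem]; intro h; subst h; exact hk)
        (by intro p h; injection h with h; subst h; exact hk)]
      simp [runAux, hp]
    · by_cases hc : now ∈ check
      · -- violation: now seen before, new run starts → duplicate key
        rw [GroupChecker.loopA, if_pos ⟨hc, by simpa [eq_comm] using hp⟩]
        have hk : now ∈ keys := (hmem now).mp hc
        have hnn : ¬ (keys ++ runAux prev (now :: r)).Nodup := by
          rw [show runAux prev (now :: r) = now :: runAux (some now) r from by
            simp [runAux, hp]]
          intro h
          have hd := (List.nodup_append.mp h).2.2
          exact absurd rfl (hd now hk now (by simp))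
        simp [hnn]
      · -- fresh key: append now to keys
        have hk : now ∉ keys := fun h => hc ((hmem now).mpr h)
        have hcond : ¬ (now ∈ check ∧ prev ≠ some now) := by intro ⟨h1, _⟩; exact hc h1
        rw [GroupChecker.loopA, if_neg hcond]
        rw [ih (check ++ [now]) (keys ++ [now]) (some now)
          (by
            simp [List.nodup_append, hnd]
            exact fun a ha he => hk (he ▸ ha))
          (by intro c; simp [hmem])
          (by intro p h; injection h with h; subst h; simp)]
        simp [runAux, if_neg hp, List.append_assoc]

theorem ofList_length_iff_nodup (xs : List Char) :
    (PySem.Set.ofList xs).length = xs.length ↔ xs.Nodup := by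
  constructor
  · induction xs with
    | nil => intro _; simp
    | cons x r ih =>
      intro h
      rw [PySem.Set.ofList_cons] at h
      simp only [List.length_cons] at h
      have hsub : (PySem.Set.discard (PySem.Set.ofList r) x).Sublist (PySem.Set.ofList r) := by
        simp [PySem.Set.discard]
      have hle1 : (PySem.Set.discard (PySem.Set.ofList r) x).length ≤ (PySem.Set.ofList r).length :=
        hsub.length_le
      have hle2 : (PySem.Set.ofList r).length ≤ r.length := PySem.Set.length_ofList_le r
      have heq : (PySem.Set.discard (PySem.Set.ofList r) x).length = r.length := by omega
      have hofl : (PySem.Set.ofList r).length = r.length := by omega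
      have hnd := ih hofl
      have hx : x ∉ r := by
        intro hxr
        have hx' : x ∈ PySem.Set.ofList r := (PySem.Set.mem_ofList _ _).mpr hxr
        have heq2 : PySem.Set.discard (PySem.Set.ofList r) x = PySem.Set.ofList r :=
          hsub.eq_of_length (by omega)
        have hmem' : x ∈ PySem.Set.discard (PySem.Set.ofList r) x := heq2.symm ▸ hx'
        exact absurd ((PySem.Set.mem_discard _ _ _).mp hmem').2 (by simp)
      simp [hnd, hx]
  · intro h
    exact congrArg List.length (PySem.Set.ofList_eq_self_of_nodup xs h)

-- ===== VERDICT (by name: the statement is the Claim_ definition above) =====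
theorem GroupChecker_spec : Claim_equal_GroupChecker := by
  intro s _
  unfold Spec_GroupChecker GroupChecker GroupChecker_alt
  rw [loopA_eq s.toList [] [] none List.nodup_nil (by simp) (by simp)]
  rw [foldl_runAux]
  simp only [List.nil_append, List.getLast?_nil]
  by_cases h : (runAux none s.toList).Nodup
  · rw [if_pos h, if_pos ((ofList_length_iff_nodup _).mpr h)]
  · rw [if_neg h, if_neg (fun hc => h ((ofList_length_iff_nodup _).mp hc))]
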